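-- pv_equiv track=rewrite | github.com/ivi982010/SySdL-TPs | Lexer.py | a_re4
-- ===== SOURCE A (Python) =====
-- def a_re4 (tokens, acu):
--     s = 0
--     for c in acu:
--         if s == 0 and c == 'e':
--             s = 1
--         elif s == 1 and c == 'l':
--             s = 2
--         elif s == 2 and c == 's':
--             s = 3
--         elif s == 3 and c == 'e':
--             s = 4
--         else:
--             s = -1
--             break
--     if s == 4:
--         tokens.append(("<Reservada>", acu))
--     return (s == 4)
-- ===== SOURCE B (Python) =====
-- def a_re4(tokens, acu):
--     ok = list(acu) == ['e', 'l', 's', 'e']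
--     if ok:
--         tokens.append(("<Reservada>", acu))
--     return ok
-- ===== Notes on version B (the rewrite author's own statement) =====
-- stated objective: simpler
-- what changed: Replaces the character-by-character DFA with break/loop state by a single whole-sequence comparison list(acu) == ['e','l','s','e'] (exact, including trailing-character and early-mismatch rejection).
import Mathlib
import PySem

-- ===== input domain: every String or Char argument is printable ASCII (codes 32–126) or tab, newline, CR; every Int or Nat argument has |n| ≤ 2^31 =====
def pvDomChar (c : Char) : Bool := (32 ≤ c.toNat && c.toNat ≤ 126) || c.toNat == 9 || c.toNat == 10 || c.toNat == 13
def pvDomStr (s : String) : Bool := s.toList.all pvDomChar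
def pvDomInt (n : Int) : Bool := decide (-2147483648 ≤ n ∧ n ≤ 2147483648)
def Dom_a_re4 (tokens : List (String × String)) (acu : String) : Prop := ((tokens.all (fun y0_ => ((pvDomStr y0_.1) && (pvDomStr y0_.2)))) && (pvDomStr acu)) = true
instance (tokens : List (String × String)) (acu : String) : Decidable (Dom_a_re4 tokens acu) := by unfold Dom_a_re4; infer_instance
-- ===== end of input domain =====

-- B replaces A's per-character DFA (with break) by a single whole-sequence comparison; equivalence is
-- about the return value (both Pythons also append the same pair to `tokens` exactly when they return True).

-- ===== PORT A =====
-- the for-loop over acu with its state s and the `break` on mismatch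
def a_re4_loop (s : Int) (cs : List Char) : Int :=
  match cs with
  | [] => s
  | c :: rest =>
    if s = 0 ∧ c = 'e' then a_re4_loop 1 rest
    else if s = 1 ∧ c = 'l' then a_re4_loop 2 rest
    else if s = 2 ∧ c = 's' then a_re4_loop 3 rest
    else if s = 3 ∧ c = 'e' then a_re4_loop 4 rest
    else -1  -- s = -1; break

def a_re4 (tokens : List (String × String)) (acu : String) : Bool :=
  a_re4_loop 0 acu.toList == 4

-- ===== PORT B =====
def a_re4_alt (tokens : List (String × String)) (acu : String) : Bool :=
  acu.toList == ['e', 'l', 's', 'e']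

-- ===== PRECONDITION & SPEC =====
def Spec_a_re4 (tokens : List (String × String)) (acu : String) (out : Bool) : Prop := out = a_re4_alt tokens acu
instance (tokens : List (String × String)) (acu : String) (out : Bool) : Decidable (Spec_a_re4 tokens acu out) := by unfold Spec_a_re4; infer_instance

-- ===== CLAIM (what is proved, stated in full; the proofs are below) =====
def Claim_equal_a_re4 : Prop := ∀ (tokens : List (String × String)) (acu : String), Dom_a_re4 tokens acu → Spec_a_re4 tokens acu (a_re4 tokens acu)

-- ===== LEMMAS AND PROOFS =====

-- once the loop has reached the accepting state 4, any further character breaks with -1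
theorem a_re4_loop_four (cs : List Char) : a_re4_loop 4 cs = if cs = [] then 4 else -1 := by
  cases cs <;> simp [a_re4_loop]

theorem a_re4_loop_zero (cs : List Char) :
    (a_re4_loop 0 cs = 4) ↔ cs = ['e', 'l', 's', 'e'] := by
  match cs with
  | [] => simp [a_re4_loop]
  | [a] => simp [a_re4_loop]; split_ifs <;> simp
  | [a, b] => simp [a_re4_loop]; split_ifs <;> simp_all
  | [a, b, c] => simp [a_re4_loop]; split_ifs <;> simp_all
  | a :: b :: c :: d :: rest =>
    by_cases ha : a = 'e'
    · subst ha
      by_cases hb : b = 'l'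
      · subst hb
        by_cases hc : c = 's'
        · subst hc
          by_cases hd : d = 'e'
          · subst hd
            rw [show a_re4_loop 0 ('e' :: 'l' :: 's' :: 'e' :: rest) = a_re4_loop 4 rest from rfl,
              a_re4_loop_four]
            split_ifs with hr <;> simp [hr]
          · rw [show a_re4_loop 0 ('e' :: 'l' :: 's' :: d :: rest) = a_re4_loop 3 (d :: rest) from rfl]
            simp [a_re4_loop, hd]
        · rw [show a_re4_loop 0 ('e' :: 'l' :: c :: d :: rest) = a_re4_loop 2 (c :: d :: rest) from rfl]
          simp [a_re4_loop, hc]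
      · rw [show a_re4_loop 0 ('e' :: b :: c :: d :: rest) = a_re4_loop 1 (b :: c :: d :: rest) from rfl]
        simp [a_re4_loop, hb]
    · simp [a_re4_loop, ha]

-- ===== VERDICT (by name: the statement is the Claim_ definition above) =====
theorem a_re4_spec : Claim_equal_a_re4 := by
  intro tokens acu _
  unfold Spec_a_re4 a_re4 a_re4_alt
  rw [Bool.eq_iff_iff]
  simp only [beq_iff_eq]
  exact a_re4_loop_zero acu.toList
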